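-- pv_equiv track=rewrite | github.com/pavitra-rastogi/python_dsa_practice | min_cost_element_removal.py | solve
-- ===== SOURCE A (Python) =====
-- def solve(A):
--     A.sort(reverse=True)  # Remove largest elements first
--     total_cost = 0
--     current_sum = sum(A)
--
--     for i in range(len(A)):
--         total_cost += current_sum
--         current_sum -= A[i]
--
--     return total_cost
-- ===== SOURCE B (Python) =====
-- def solve(A):
--     A.sort(reverse=True)  # Remove largest elements first (same in-place mutation as A)
--     return sum((i + 1) * a for i, a in enumerate(A))
-- ===== Notes on version B (the rewrite author's own statement) =====
-- stated objective: simpler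
-- what changed: Replaces the running current_sum accumulator and per-index subtraction loop with a direct position-weighted sum: element at index i of the descending-sorted list contributes (i+1) times.
import Mathlib
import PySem

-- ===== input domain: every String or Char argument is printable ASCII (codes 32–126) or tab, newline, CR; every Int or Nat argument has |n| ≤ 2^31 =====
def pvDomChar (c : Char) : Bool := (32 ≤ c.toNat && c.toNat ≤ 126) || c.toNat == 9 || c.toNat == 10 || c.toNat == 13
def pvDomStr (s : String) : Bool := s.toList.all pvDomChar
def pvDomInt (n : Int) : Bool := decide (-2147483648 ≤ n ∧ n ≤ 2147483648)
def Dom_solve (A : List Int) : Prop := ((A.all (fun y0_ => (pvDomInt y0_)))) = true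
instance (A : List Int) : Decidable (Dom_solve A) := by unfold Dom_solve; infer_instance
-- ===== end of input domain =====

-- B replaces A's running-sum loop with a direct position-weighted sum ((i+1)·A[i] over the
-- descending-sorted list); equivalence is about the RETURN value (both sort the argument in place).

-- ===== PORT A =====
def solve (A : List Int) : Int :=
  let As := PySem.List.sorted A (fun x => x) true
  let r := (PySem.List.pyRange 0 (As.length : Int) 1).foldl
      (fun (st : Int × Int) i => (st.1 + st.2, st.2 - PySem.List.pyGetD As i 0)) (0, As.sum)
  r.1

-- ===== PORT B =====
def solve_alt (A : List Int) : Int :=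
  let As := PySem.List.sorted A (fun x => x) true
  ((PySem.List.enumerate As 0).map (fun p => (p.1 + 1) * p.2)).sum

-- ===== PRECONDITION & SPEC =====
def Spec_solve (A : List Int) (out : Int) : Prop := out = solve_alt A
instance (A : List Int) (out : Int) : Decidable (Spec_solve A out) := by unfold Spec_solve; infer_instance

-- ===== CLAIM (what is proved, stated in full; the proofs are below) =====
def Claim_equal_solve : Prop := ∀ (A : List Int), Dom_solve A → Spec_solve A (solve A)

-- ===== LEMMAS AND PROOFS =====

lemma sum_weight_split (l : List (Int × Int)) (s : Int) :
    (l.map (fun p => (p.1 + 1 - s) * p.2)).sum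
      = (l.map (fun p => (p.1 + 1 - (s + 1)) * p.2)).sum + (l.map (·.2)).sum := by
  induction l with
  | nil => simp
  | cons h t ih => simp [ih]; ring

lemma loop_eq (L : List Int) : ∀ (s t c : Int),
    (L.foldl (fun (st : Int × Int) x => (st.1 + st.2, st.2 - x)) (t, c)).1
      = t + L.length * (c - L.sum)
        + ((PySem.List.enumerate L s).map (fun p => (p.1 + 1 - s) * p.2)).sum := by
  induction L with
  | nil => intro s t c; simp
  | cons x xs ih =>
      intro s t c
      simp only [List.foldl_cons, PySem.List.enumerate_cons, List.map_cons, List.sum_cons]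
      rw [ih (s + 1) (t + c) (c - x), sum_weight_split _ s, PySem.List.map_snd_enumerate]
      simp only [List.length_cons]
      push_cast
      ring

-- ===== VERDICT (by name: the statement is the Claim_ definition above) =====
theorem solve_spec : Claim_equal_solve := by
  intro A _
  simp only [Spec_solve, solve, solve_alt]
  rw [PySem.List.foldl_pyRange_pyGetD' (a := 0)
        (f := fun (st : Int × Int) v => (st.1 + st.2, st.2 - v))
        (xs := PySem.List.sorted A (fun x => x) true) (d := 0)
        (init := (0, (PySem.List.sorted A (fun x => x) true).sum)) (by norm_num)]
  norm_num
  rw [loop_eq _ 0]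
  simp
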